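-- pv_equiv track=rewrite | github.com/davidsluo/notes | CSCI_4760/pj03/file_transfer/utils.py | divide_into_sections
-- ===== SOURCE A (Python) =====
-- import itertools
--
-- def base_two_round(num):
--     i = 0
--     while num > 1:
--         num >>= 1
--         i += 1
--     return 1 << i
--
-- def divide_into_sections(size, divisions):
--     if divisions == 0:
--         raise ZeroDivisionError
--     elif divisions < 0:
--         raise ValueError('Number of divisions cannot be less than zero.')
--
--     section_size = base_two_round(size // divisions)
--     sections = [section_size] * divisions
--     bytes_left = size - sum(sections)
--     i = 0
--     while i < len(sections) and bytes_left > section_size: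
--         sections[i] += section_size
--         bytes_left -= section_size
--         i += 1
--     sections[-1] += bytes_left
--
--     indicies = [0] + list(itertools.accumulate(sections))
--     start_end = ((start, end) for start, end in zip(indicies[:-1], indicies[1:]))
--     offset_length = [(start, end - start) for start, end in start_end]
--     return offset_length
-- ===== SOURCE B (Python) =====
-- def base_two_round(num):
--     # closed form: largest power of two <= num (and 1 for num <= 1)
--     return 1 << (num.bit_length() - 1) if num > 1 else 1
--
-- def divide_into_sections(size, divisions):
--     if divisions == 0:
--         raise ZeroDivisionError
--     elif divisions < 0:
--         raise ValueError('Number of divisions cannot be less than zero.')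
--     section_size = base_two_round(size // divisions)
--     bytes_left = size - divisions * section_size
--     result = []
--     offset = 0
--     for i in range(divisions):
--         length = section_size
--         if bytes_left > section_size:
--             length += section_size
--             bytes_left -= section_size
--         if i == divisions - 1:
--             length += bytes_left
--         result.append((offset, length))
--         offset += length
--     return result
-- ===== Notes on version B (the rewrite author's own statement) =====
-- stated objective: faster
-- what changed: Fused A's four passes (build sections list, distribute doubling loop, itertools.accumulate, zip+map) into one forward scan with a running offset, and replaced the shift-loop base_two_round with a bit_length closed form.
import Mathlib
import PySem

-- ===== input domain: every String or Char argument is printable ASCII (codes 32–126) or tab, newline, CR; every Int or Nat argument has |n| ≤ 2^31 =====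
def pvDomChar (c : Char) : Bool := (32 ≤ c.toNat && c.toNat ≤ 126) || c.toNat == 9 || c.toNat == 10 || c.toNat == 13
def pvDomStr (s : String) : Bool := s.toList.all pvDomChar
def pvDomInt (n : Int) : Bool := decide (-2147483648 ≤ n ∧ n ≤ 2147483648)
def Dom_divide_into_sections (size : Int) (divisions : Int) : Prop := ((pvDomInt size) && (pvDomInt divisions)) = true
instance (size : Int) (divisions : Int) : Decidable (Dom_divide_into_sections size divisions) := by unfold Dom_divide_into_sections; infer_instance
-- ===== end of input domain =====

-- B fuses A's build/distribute/accumulate/zip passes into one forward scan with a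
-- running offset, and computes base_two_round by bit_length instead of a shift loop.

-- ===== PORT A =====

-- while num > 1: num >>= 1; i += 1  (accumulator i)
def btrGoA (num : Int) (i : Nat) : Nat :=
  if h : 1 < num then
    btrGoA (PySem.Int.floordiv num 2) (i + 1)
  else i
termination_by num.toNat
decreasing_by
  have h2 : PySem.Int.floordiv num 2 = num / 2 := PySem.Int.floordiv_eq_ediv_of_pos (by omega)
  rw [h2]; omega

-- base_two_round: returns 1 << i, i.e. 2 ^ i
def base_two_roundA (num : Int) : Int := 2 ^ (btrGoA num 0)

-- itertools.accumulate with running total a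
def accumulateA (a : Int) : List Int → List Int
  | [] => []
  | x :: xs => (a + x) :: accumulateA (a + x) xs

-- while i < len(sections) and bytes_left > section_size: sections[i] += section_size; …
def loopA (s : Int) (sections : List Int) (bl : Int) (i : Nat) : List Int × Int :=
  if h : i < sections.length ∧ bl > s then
    loopA s (sections.set i (sections.getD i 0 + s)) (bl - s) (i + 1)
  else (sections, bl)
termination_by sections.length - i
decreasing_by simp only [List.length_set]; omega

def divide_into_sections (size : Int) (divisions : Int) : List (Int × Int) :=
  -- divisions == 0 / divisions < 0 raise in Python: excluded by Pre_
  let section_size := base_two_roundA (PySem.Int.floordiv size divisions)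
  let sections := List.replicate divisions.toNat section_size
  let bytes_left := size - sections.sum
  let r := loopA section_size sections bytes_left 0
  -- sections[-1] += bytes_left
  let sections2 := r.1.set (r.1.length - 1) (r.1.getD (r.1.length - 1) 0 + r.2)
  let indicies := 0 :: accumulateA 0 sections2
  (indicies.dropLast.zip indicies.tail).map (fun p => (p.1, p.2 - p.1))

-- ===== PORT B =====

-- 1 << (num.bit_length() - 1) if num > 1 else 1
def base_two_roundB (num : Int) : Int :=
  if 1 < num then 2 ^ (PySem.Int.bitLength num - 1) else 1

-- single forward scan; n counts remaining iterations (n = 1 ↔ last index)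
def goB (s : Int) : Nat → Int → Int → List (Int × Int)
  | 0, _, _ => []
  | Nat.succ n, offset, bl =>
    let p := if bl > s then (s + s, bl - s) else (s, bl)
    let len := if n = 0 then p.1 + p.2 else p.1
    (offset, len) :: goB s n (offset + len) p.2

def divide_into_sections_alt (size : Int) (divisions : Int) : List (Int × Int) :=
  let s := base_two_roundB (PySem.Int.floordiv size divisions)
  goB s divisions.toNat 0 (size - divisions * s)

-- ===== PRECONDITION & SPEC =====
-- Python A raises ZeroDivisionError on divisions == 0 and ValueError on divisions < 0.
def Pre_divide_into_sections (size : Int) (divisions : Int) : Prop := 0 < divisions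
instance (size : Int) (divisions : Int) : Decidable (Pre_divide_into_sections size divisions) := by unfold Pre_divide_into_sections; infer_instance
def pvWitness_divide_into_sections : Int × Int := (100, 3)

def Spec_divide_into_sections (size : Int) (divisions : Int) (out : List (Int × Int)) : Prop := out = divide_into_sections_alt size divisions
instance (size : Int) (divisions : Int) (out : List (Int × Int)) : Decidable (Spec_divide_into_sections size divisions out) := by unfold Spec_divide_into_sections; infer_instance

-- ===== CLAIM (what is proved, stated in full; the proofs are below) =====
def Claim_equal_divide_into_sections : Prop := ∀ (size : Int) (divisions : Int), Dom_divide_into_sections size divisions → Pre_divide_into_sections size divisions → Spec_divide_into_sections size divisions (divide_into_sections size divisions)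

-- ===== LEMMAS AND PROOFS =====

-- the two base_two_round helpers agree
theorem btrGoA_eq (num : Int) (i : Nat) (h1 : 1 ≤ num) :
    btrGoA num i = (PySem.Int.bitLength num - 1) + i := by
  rw [btrGoA]
  by_cases h : 1 < num
  · rw [dif_pos h]
    have hfd : PySem.Int.floordiv num 2 = num / 2 := PySem.Int.floordiv_eq_ediv_of_pos (by omega)
    have h1' : 1 ≤ PySem.Int.floordiv num 2 := by rw [hfd]; omega
    rw [btrGoA_eq (PySem.Int.floordiv num 2) (i + 1) h1']
    have hbl : PySem.Int.bitLength num = PySem.Int.bitLength (PySem.Int.floordiv num 2) + 1 :=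
      PySem.Int.bitLength_of_pos (by omega)
    have hpos : 1 ≤ PySem.Int.bitLength (PySem.Int.floordiv num 2) := by
      rw [PySem.Int.bitLength_of_pos (by omega : (0:Int) < PySem.Int.floordiv num 2)]; omega
    omega
  · rw [dif_neg h]
    have hn1 : num = 1 := by omega
    subst hn1
    have : PySem.Int.bitLength 1 = 1 := by decide
    omega
termination_by num.toNat
decreasing_by
  have h2 : PySem.Int.floordiv num 2 = num / 2 := PySem.Int.floordiv_eq_ediv_of_pos (by omega)
  rw [h2]; omega

theorem base_two_round_eq (num : Int) : base_two_roundA num = base_two_roundB num := by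
  unfold base_two_roundA base_two_roundB
  by_cases h : 1 < num
  · rw [if_pos h, btrGoA_eq num 0 (by omega)]
    norm_num
  · rw [if_neg h, btrGoA, dif_neg h]
    norm_num

-- structural version of A's index loop, acting on the yet-unvisited suffix
def fA (s : Int) : List Int → Int → List Int × Int
  | [], bl => ([], bl)
  | x :: xs, bl =>
    if bl > s then
      let r := fA s xs (bl - s)
      ((x + s) :: r.1, r.2)
    else (x :: xs, bl)

theorem fA_length (s : Int) (l : List Int) (bl : Int) : (fA s l bl).1.length = l.length := by
  induction l generalizing bl with
  | nil => simp [fA]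
  | cons x xs ih => simp only [fA]; split_ifs with h <;> simp [ih]

theorem fA_of_not_gt (s : Int) (l : List Int) (bl : Int) (h : ¬ bl > s) : fA s l bl = (l, bl) := by
  cases l <;> simp [fA, h]

theorem set_append_len (l1 : List Int) (x v : Int) (xs : List Int) :
    (l1 ++ x :: xs).set l1.length v = l1 ++ v :: xs := by
  induction l1 with
  | nil => rfl
  | cons y ys ih => simp [ih]

theorem getD_append_len (l1 : List Int) (x : Int) (xs : List Int) :
    (l1 ++ x :: xs).getD l1.length 0 = x := by
  induction l1 with
  | nil => rfl
  | cons y ys ih => simpa using ih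

theorem loopA_eq_fA (s : Int) : ∀ (l2 l1 : List Int) (bl : Int),
    loopA s (l1 ++ l2) bl l1.length = (l1 ++ (fA s l2 bl).1, (fA s l2 bl).2) := by
  intro l2
  induction l2 with
  | nil =>
    intro l1 bl
    rw [loopA, dif_neg (by simp)]
    simp [fA]
  | cons x xs ih =>
    intro l1 bl
    rw [loopA]
    by_cases h : bl > s
    · rw [dif_pos ⟨by simp, h⟩, getD_append_len, set_append_len]
      have hlen : l1.length + 1 = (l1 ++ [x + s]).length := by simp
      have happ : l1 ++ (x + s) :: xs = (l1 ++ [x + s]) ++ xs := by simp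
      rw [hlen, happ, ih (l1 ++ [x + s]) (bl - s)]
      simp [fA, h]
    · rw [dif_neg (by intro hc; exact h hc.2)]
      simp [fA, h]

-- proof-side output builder: (offset, x) pairs with a running offset
def pairsFold (off : Int) : List Int → List (Int × Int)
  | [] => []
  | x :: xs => (off, x) :: pairsFold (off + x) xs

theorem zip_accumulate_eq (l : List Int) : ∀ a : Int,
    (((a :: accumulateA a l).dropLast.zip (accumulateA a l)).map (fun p => (p.1, p.2 - p.1)))
      = pairsFold a l := by
  induction l with
  | nil => intro a; simp [accumulateA, pairsFold]
  | cons x xs ih =>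
    intro a
    simp only [accumulateA, List.dropLast_cons₂, List.zip_cons_cons, List.map_cons, ih (a + x),
      pairsFold]
    congr 1
    simp

-- last-element update commutes with cons on a nonempty tail
theorem set_last_cons (x v : Int) (l : List Int) (h : l ≠ []) :
    (x :: l).set ((x :: l).length - 1) ((x :: l).getD ((x :: l).length - 1) 0 + v)
      = x :: l.set (l.length - 1) (l.getD (l.length - 1) 0 + v) := by
  cases l with
  | nil => exact absurd rfl h
  | cons y ys =>
    simp only [List.length_cons, Nat.add_sub_cancel, List.getD_eq_getElem?_getD]
    rfl

-- main loop correspondence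
theorem main_loop (s : Int) : ∀ (n : Nat), 0 < n → ∀ (bl offset : Int),
    pairsFold offset
      ((fA s (List.replicate n s) bl).1.set ((fA s (List.replicate n s) bl).1.length - 1)
        ((fA s (List.replicate n s) bl).1.getD ((fA s (List.replicate n s) bl).1.length - 1) 0
          + (fA s (List.replicate n s) bl).2))
      = goB s n offset bl := by
  intro n
  induction n with
  | zero => omega
  | succ m ih =>
    intro _ bl offset
    by_cases hm : m = 0
    · subst hm
      by_cases h : bl > s
      · simp [fA, h, goB, pairsFold, List.replicate]
      · simp [fA, h, goB, pairsFold, List.replicate]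
    · have hm' : 0 < m := Nat.pos_of_ne_zero hm
      rw [List.replicate_succ]
      by_cases h : bl > s
      · simp only [fA, if_pos h]
        have hne : (fA s (List.replicate m s) (bl - s)).1 ≠ [] := by
          intro hc
          have hlen := fA_length s (List.replicate m s) (bl - s)
          rw [hc] at hlen
          simp at hlen
          omega
        rw [set_last_cons _ _ _ hne]
        simp only [pairsFold]
        rw [ih hm' (bl - s) (offset + (s + s))]
        rw [show goB s (m + 1) offset bl = (offset, s + s) :: goB s m (offset + (s + s)) (bl - s) by
          rw [goB]; simp [h, hm]]
      · simp only [fA, if_neg h]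
        have hne : List.replicate m s ≠ [] := by
          simpa using hm
        rw [set_last_cons _ _ _ hne]
        simp only [pairsFold]
        have hih := ih hm' bl (offset + s)
        rw [fA_of_not_gt s _ bl h] at hih
        rw [hih]
        rw [show goB s (m + 1) offset bl = (offset, s) :: goB s m (offset + s) bl by
          rw [goB]; simp [h, hm]]

-- ===== VERDICT (by name: the statement is the Claim_ definition above) =====
theorem divide_into_sections_spec : Claim_equal_divide_into_sections := by
  intro size divisions _dom hpre
  have hd : 0 < divisions := hpre
  unfold Spec_divide_into_sections divide_into_sections divide_into_sections_alt
  simp only [base_two_round_eq]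
  rw [show (0 : Nat) = ([] : List Int).length from rfl]
  rw [show (List.replicate divisions.toNat (base_two_roundB (PySem.Int.floordiv size divisions)))
        = [] ++ (List.replicate divisions.toNat (base_two_roundB (PySem.Int.floordiv size divisions)))
      from rfl]
  rw [loopA_eq_fA]
  simp only [List.nil_append, List.tail_cons]
  rw [zip_accumulate_eq]
  have hsum : (List.replicate divisions.toNat
      (base_two_roundB (PySem.Int.floordiv size divisions))).sum
      = divisions * base_two_roundB (PySem.Int.floordiv size divisions) := by
    rw [List.sum_replicate, nsmul_eq_mul, Int.toNat_of_nonneg (by omega)]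
  rw [hsum]
  exact main_loop _ divisions.toNat (by omega) _ 0
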